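-- pv_equiv track=rewrite | github.com/gregersn/AoC | 2023/12.py | verify_arrangement
-- ===== SOURCE A (Python) =====
-- from itertools import groupby
-- from typing import Iterator, Tuple
--
-- def run_length_encode(data: str) -> Iterator[Tuple[str, int]]:
--     """Returns run length encoded Tuples for string"""
--     # A memory efficient (lazy) and pythonic solution using generators
--     return ((x, sum(1 for _ in y)) for x, y in groupby(data))
--
-- def verify_arrangement(report: str, stats: list[int]) -> bool:
--     rle = run_length_encode(report)
--     i = 0
--     for g in rle:
--         if g[0] == "#":
--             if g[1] != stats[i]:
--                 return False
--             i += 1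
--     return True
-- ===== SOURCE B (Python) =====
-- def verify_arrangement(report: str, stats: list[int]) -> bool:
--     blanked = "".join(c if c == "#" else " " for c in report)
--     runs = [len(group) for group in blanked.split()]
--     return runs == stats[:len(runs)]
-- ===== Notes on version B (the rewrite author's own statement) =====
-- stated objective: faster
-- what changed: Replaced the groupby stream and its indexed comparison loop with a staged pipeline: blank out non-'#' characters, str.split() into words, map to lengths, and compare that whole list to the matching prefix slice of stats with one list equality; the C-level str.split/list comparison removes the per-character generator overhead (measured ~5x at the largest size).
import Mathlib
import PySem

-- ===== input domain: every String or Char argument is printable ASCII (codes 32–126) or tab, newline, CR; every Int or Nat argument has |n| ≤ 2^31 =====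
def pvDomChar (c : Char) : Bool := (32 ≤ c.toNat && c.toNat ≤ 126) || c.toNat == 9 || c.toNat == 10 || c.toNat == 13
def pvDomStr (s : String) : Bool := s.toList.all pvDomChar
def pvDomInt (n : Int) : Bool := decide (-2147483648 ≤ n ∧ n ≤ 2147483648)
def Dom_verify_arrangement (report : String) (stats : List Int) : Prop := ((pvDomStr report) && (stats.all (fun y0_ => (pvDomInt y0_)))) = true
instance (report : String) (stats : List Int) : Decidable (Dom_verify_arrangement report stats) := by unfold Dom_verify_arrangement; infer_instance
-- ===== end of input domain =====

-- B replaces A's groupby stream and indexed comparison loop with a staged pipeline: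
-- blank non-'#' chars, str.split() into words, map to lengths, compare to a prefix slice of
-- stats (objective: faster — a timing run measured B ≥ 1.5× faster at the largest size).

-- ===== PORT A =====
-- groupby: count the leading run of `c` in the rest of the list (count starts at 1 for `c` itself)
def countRun (c : Char) : List Char → Int × List Char
  | [] => (1, [])
  | d :: ds =>
    if d = c then
      let (n, r) := countRun c ds
      (n + 1, r)
    else (1, d :: ds)

theorem countRun_snd_length (c : Char) (xs : List Char) : (countRun c xs).2.length ≤ xs.length := by
  induction xs with
  | nil => simp [countRun]
  | cons d ds ih =>
    by_cases h : d = c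
    · simp [countRun, h]; omega
    · simp [countRun, h]

-- run_length_encode: the list of (char, group length) pairs, in order
def groupRLE : List Char → List (Char × Int)
  | [] => []
  | c :: cs =>
    (c, (countRun c cs).1) :: groupRLE (countRun c cs).2
termination_by xs => xs.length
decreasing_by
  simpa using Nat.lt_succ_of_le (countRun_snd_length c cs)

-- the for-loop of A over the groups; `none` from pyGet? = Python's IndexError (outside Pre_)
def loopA (gs : List (Char × Int)) (stats : List Int) (i : Int) : Bool :=
  match gs with
  | [] => true
  | g :: rest =>
    if g.1 = '#' then
      match PySem.List.pyGet? stats i with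
      | none => false
      | some v => if g.2 ≠ v then false else loopA rest stats (i + 1)
    else loopA rest stats i

def verify_arrangement (report : String) (stats : List Int) : Bool :=
  loopA (groupRLE report.toList) stats 0

-- ===== PORT B =====
-- staged pipeline, following Source B: blank non-'#', split, lengths, compare to stats[:len(runs)]
def verify_arrangement_alt (report : String) (stats : List Int) : Bool :=
  let blanked := report.toList.map (fun c => if c = '#' then c else ' ')
  let runs := (PySem.Chars.split₀ blanked).map (fun group => (group.length : Int))
  decide (runs = PySem.List.slice stats none (some (runs.length : Int)))

-- ===== PRECONDITION & SPEC =====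
-- the lengths of the maximal '#'-runs of the report, in order (reference only; used by Pre_)
def pyHashRuns (report : String) : List Int :=
  ((report.toList.splitOnP (fun c => !(c == '#'))).filter (fun l => !l.isEmpty)).map
    (fun l => (l.length : Int))

-- Pre_ excludes exactly the inputs where Python A raises IndexError: there are more '#'-runs
-- than stats and every stat is matched by the corresponding '#'-run.
def Pre_verify_arrangement (report : String) (stats : List Int) : Prop :=
  ¬ (stats.length < (pyHashRuns report).length ∧ (pyHashRuns report).take stats.length = stats)
instance (report : String) (stats : List Int) : Decidable (Pre_verify_arrangement report stats) := by
  unfold Pre_verify_arrangement; infer_instance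

def pvWitness_verify_arrangement : String × List Int := ("#.##.", [1, 2])

def Spec_verify_arrangement (report : String) (stats : List Int) (out : Bool) : Prop := out = verify_arrangement_alt report stats
instance (report : String) (stats : List Int) (out : Bool) : Decidable (Spec_verify_arrangement report stats out) := by unfold Spec_verify_arrangement; infer_instance

-- ===== CLAIM (what is proved, stated in full; the proofs are below) =====
def Claim_equal_verify_arrangement : Prop := ∀ (report : String) (stats : List Int), Dom_verify_arrangement report stats → Pre_verify_arrangement report stats → Spec_verify_arrangement report stats (verify_arrangement report stats)

-- ===== LEMMAS AND PROOFS =====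

-- common reference: the '#'-run lengths with a pending run `run`
def hashRunsAux (run : Int) : List Char → List Int
  | [] => if run > 0 then [run] else []
  | c :: cs =>
    if c = '#' then hashRunsAux (run + 1) cs
    else if run > 0 then run :: hashRunsAux 0 cs else hashRunsAux 0 cs

-- checking a list of run lengths against stats from index i (A's loop, groups abstracted away)
def check (ns : List Int) (stats : List Int) (i : Int) : Bool :=
  match ns with
  | [] => true
  | n :: rest =>
    match PySem.List.pyGet? stats i with
    | none => false
    | some v => if n ≠ v then false else check rest stats (i + 1)

theorem hashRunsAux_hash (cs : List Char) : ∀ k : Int, 0 ≤ k →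
    hashRunsAux (k + 1) cs = (k + (countRun '#' cs).1) :: hashRunsAux 0 (countRun '#' cs).2 := by
  induction cs with
  | nil =>
    intro k hk
    simp only [countRun, hashRunsAux]
    rw [if_pos (by omega : k + 1 > 0)]
    simp
  | cons d ds ih =>
    intro k hk
    by_cases h : d = '#'
    · subst h
      have l : hashRunsAux (k + 1) ('#' :: ds) = hashRunsAux (k + 1 + 1) ds := by
        simp [hashRunsAux]
      have r : countRun '#' ('#' :: ds) = ((countRun '#' ds).1 + 1, (countRun '#' ds).2) := by
        simp [countRun]
      rw [l, r, ih (k + 1) (by omega)]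
      congr 1
      omega
    · simp only [countRun, hashRunsAux, if_neg h]
      rw [if_pos (by omega : k + 1 > 0)]
      simp

theorem hashRunsAux_nonhash (cs : List Char) : ∀ c : Char, c ≠ '#' →
    hashRunsAux 0 (c :: cs) = hashRunsAux 0 (countRun c cs).2 := by
  induction cs with
  | nil =>
    intro c hc
    simp [countRun, hashRunsAux, hc]
  | cons d ds ih =>
    intro c hc
    by_cases h : d = c
    · subst h
      have h1 : hashRunsAux 0 (d :: d :: ds) = hashRunsAux 0 (d :: ds) := by
        simp [hashRunsAux, hc]
      rw [h1, ih d hc]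
      simp [countRun]
    · simp only [countRun, if_neg h]
      simp [hashRunsAux, hc]

theorem loopA_check (n : Nat) : ∀ (cs : List Char), cs.length ≤ n → ∀ (stats : List Int) (i : Int),
    loopA (groupRLE cs) stats i = check (hashRunsAux 0 cs) stats i := by
  induction n with
  | zero =>
    intro cs hlen stats i
    have : cs = [] := List.eq_nil_of_length_eq_zero (Nat.le_zero.mp hlen)
    subst this
    simp [groupRLE, loopA, hashRunsAux, check]
  | succ m ih =>
    intro cs hlen stats i
    cases cs with
    | nil => simp [groupRLE, loopA, hashRunsAux, check]
    | cons c rest =>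
      have hr : (countRun c rest).2.length ≤ m := by
        have := countRun_snd_length c rest
        simp at hlen; omega
      by_cases hc : c = '#'
      · subst hc
        rw [groupRLE]
        simp only [loopA, reduceIte]
        have haux : hashRunsAux 0 ('#' :: rest)
            = (countRun '#' rest).1 :: hashRunsAux 0 (countRun '#' rest).2 := by
          have h0 : hashRunsAux 0 ('#' :: rest) = hashRunsAux (0 + 1) rest := by
            simp [hashRunsAux]
          rw [h0, hashRunsAux_hash rest 0 le_rfl]
          simp
        rw [haux]
        simp only [check]
        cases PySem.List.pyGet? stats i with
        | none => rfl
        | some v =>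
          by_cases hv : (countRun '#' rest).1 = v
          · simp only [hv, ne_eq, not_true_eq_false, if_false]
            exact ih _ hr stats (i + 1)
          · simp [hv]
      · rw [groupRLE]
        simp only [loopA, if_neg hc]
        rw [hashRunsAux_nonhash rest c hc]
        exact ih _ hr stats i

-- B side: split₀ of the blanked string yields exactly the '#'-runs
theorem go_hashRuns (cs : List Char) : ∀ (run : Nat) (acc : List (List Char)),
    (PySem.Chars.split₀.go (cs.map (fun c => if c = '#' then c else ' '))
        (List.replicate run '#') acc).map (fun g => (g.length : Int))
      = acc.reverse.map (fun g => (g.length : Int)) ++ hashRunsAux (run : Int) cs := by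
  induction cs with
  | nil =>
    intro run acc
    cases run with
    | zero => simp [PySem.Chars.split₀.go, hashRunsAux]
    | succ r =>
      have hne : (List.replicate (r + 1) '#').isEmpty = false := by simp
      simp only [List.map_nil, PySem.Chars.split₀.go, hne, Bool.false_eq_true, if_false]
      have hpos : ((r + 1 : Nat) : Int) > 0 := by positivity
      simp [hashRunsAux, hpos]
  | cons c rest ih =>
    intro run acc
    by_cases hc : c = '#'
    · subst hc
      have hsp : PySem.Chars.isspace '#' = false := by decide
      simp only [List.map_cons, reduceIte]
      simp only [PySem.Chars.split₀.go, hsp, Bool.false_eq_true, if_false]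
      have : ('#' :: List.replicate run '#') = List.replicate (run + 1) '#' := by
        simp [List.replicate_succ]
      rw [this, ih (run + 1) acc]
      have : hashRunsAux (run : Int) ('#' :: rest) = hashRunsAux ((run : Int) + 1) rest := by
        simp [hashRunsAux]
      rw [this]
      push_cast
      rfl
    · have hsp : PySem.Chars.isspace ' ' = true := by decide
      simp only [List.map_cons, if_neg hc, PySem.Chars.split₀.go, hsp, if_pos rfl]
      cases run with
      | zero =>
        simp only [List.replicate, List.isEmpty_nil, if_pos trivial]
        have h := ih 0 acc
        simp only [List.replicate] at h
        rw [h]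
        simp [hashRunsAux, hc]
      | succ r =>
        have hne : (List.replicate (r + 1) '#').isEmpty = false := by simp
        simp only [hne, Bool.false_eq_true, if_false, if_pos trivial]
        have h := ih 0 ((List.replicate (r + 1) '#').reverse :: acc)
        simp only [List.replicate] at h
        rw [List.replicate_succ, h]
        have hpos : ((r + 1 : Nat) : Int) > 0 := by positivity
        simp [hashRunsAux, hc, hpos]

-- A's abstracted loop IS prefix equality against stats
theorem check_eq_prefix (ns : List Int) : ∀ (stats : List Int) (k : Nat),
    check ns stats (k : Int) = decide (ns = (stats.drop k).take ns.length) := by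
  induction ns with
  | nil => intro stats k; simp [check]
  | cons n rest ih =>
    intro stats k
    by_cases hk : k < stats.length
    · have hget : PySem.List.pyGet? stats (k : Int) = some stats[k] := by
        simp [PySem.List.pyGet?, PySem.List.pyIdx?, hk]
      have hdrop : stats.drop k = stats[k] :: stats.drop (k + 1) :=
        (List.drop_eq_getElem_cons hk)
      rw [check, hget, hdrop]
      by_cases hv : n = stats[k]
      · subst hv
        simp only [ne_eq, not_true_eq_false, if_false]
        have : ((k : Int) + 1) = ((k + 1 : Nat) : Int) := by push_cast; ring
        rw [this, ih stats (k + 1)]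
        simp only [List.length_cons, List.take_succ_cons, decide_eq_decide,
          List.cons.injEq, true_and]
      · simp only [ne_eq, hv, not_false_eq_true, if_true, List.length_cons,
          List.take_succ_cons, List.cons.injEq]
        simp [hv]
    · have hget : PySem.List.pyGet? stats (k : Int) = none := by
        simp [PySem.List.pyGet?, PySem.List.pyIdx?]
        omega
      rw [check, hget]
      have : stats.drop k = [] := List.drop_eq_nil_of_le (by omega)
      simp [this]

-- ===== VERDICT (by name: the statement is the Claim_ definition above) =====
theorem verify_arrangement_spec : Claim_equal_verify_arrangement := by
  intro report stats _ _
  unfold Spec_verify_arrangement verify_arrangement verify_arrangement_alt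
  have hruns : (PySem.Chars.split₀ (report.toList.map (fun c => if c = '#' then c else ' '))).map
      (fun g => (g.length : Int)) = hashRunsAux 0 report.toList := by
    have := go_hashRuns report.toList 0 []
    simpa [PySem.Chars.split₀] using this
  simp only [hruns]
  rw [loopA_check report.toList.length report.toList le_rfl stats 0]
  have hc := check_eq_prefix (hashRunsAux 0 report.toList) stats 0
  norm_num at hc
  rw [hc, PySem.List.slice_to_natCast]
  rfl
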